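-- pv_equiv track=rewrite | github.com/Voulgaris-Sot/advent-of-code-2017 | Day6/floyd-cycle.py | my_f
-- ===== SOURCE A (Python) =====
-- def my_f(xx):
--     x = list(xx)
--
--     mx = max(x)
--     index = x.index(mx)
--     x[index] = 0
--     length = len(x)
--
--     while(mx > 0):
--         #move to next position and add one
--         index = (index + 1)%length
--         x[index] += 1
--         mx -= 1
--     return x
-- ===== SOURCE B (Python) =====
-- def my_f(xx):
--     x = list(xx)
--     mx = max(x)
--     i = x.index(mx)
--     x[i] = 0
--     n = len(x)
--     if mx <= 0:
--         return x
--     q, r = divmod(mx, n)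
--     return [v + q + (1 if 1 <= (j - i) % n <= r else 0) for j, v in enumerate(x)]
-- ===== Notes on version B (the rewrite author's own statement) =====
-- stated objective: alternative
-- what changed: Replaces A's one-unit-at-a-time redistribution loop (one iteration per unit of mx) by a divmod closed form: each position gets the uniform quotient plus one extra unit iff it lies within the first r positions after the emptied index, built in a single comprehension.
import Mathlib
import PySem

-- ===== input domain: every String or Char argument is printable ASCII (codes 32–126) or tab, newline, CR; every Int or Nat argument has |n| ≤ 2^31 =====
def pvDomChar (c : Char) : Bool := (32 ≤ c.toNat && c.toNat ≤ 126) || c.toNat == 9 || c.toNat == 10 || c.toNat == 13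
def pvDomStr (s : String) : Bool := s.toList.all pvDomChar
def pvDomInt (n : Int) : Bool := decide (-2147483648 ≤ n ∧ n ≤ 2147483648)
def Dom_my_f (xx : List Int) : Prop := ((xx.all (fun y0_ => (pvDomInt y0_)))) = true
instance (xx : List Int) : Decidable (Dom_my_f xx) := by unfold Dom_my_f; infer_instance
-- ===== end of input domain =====

-- B replaces A's one-unit-at-a-time redistribution loop (mx iterations) by a divmod closed
-- form (uniform quotient plus one extra for the r positions after the emptied index).

-- ===== PORT A =====
-- the while loop of A: runs once per remaining unit of mx; index always stays in [0, length)
def my_f_loop (x : List Int) (index length : Int) : Nat → List Int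
  | 0 => x
  | t+1 =>
    let i := PySem.Int.mod (index + 1) length
    my_f_loop (x.set i.toNat (x.getD i.toNat 0 + 1)) i length t

def my_f (xx : List Int) : List Int :=
  match PySem.List.max? xx (fun y => y) with
  | none => []  -- unreachable: max([]) raises ValueError; Pre_my_f excludes []
  | some mx =>
    match PySem.List.index? xx mx with
    | none => []  -- unreachable: mx is a member of xx
    | some index =>
      let x := xx.set index 0
      let length : Int := x.length
      my_f_loop x (index : Int) length mx.toNat

-- ===== PORT B =====
def my_f_alt (xx : List Int) : List Int :=
  match PySem.List.max? xx (fun y => y) with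
  | none => []  -- unreachable: max([]) raises ValueError; Pre_my_f excludes []
  | some mx =>
    match PySem.List.index? xx mx with
    | none => []  -- unreachable: mx is a member of xx
    | some i =>
      let x := xx.set i 0
      let n : Int := x.length
      if mx ≤ 0 then x
      else
        let q := PySem.Int.floordiv mx n
        let r := PySem.Int.mod mx n
        (PySem.List.enumerate x).map (fun jv =>
          jv.2 + q + (if 1 ≤ PySem.Int.mod (jv.1 - (i : Int)) n ∧
                         PySem.Int.mod (jv.1 - (i : Int)) n ≤ r then 1 else 0))

-- ===== PRECONDITION & SPEC =====
-- Pre_ excludes only the empty list, on which A (and B) raise ValueError from max([]).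
def Pre_my_f (xx : List Int) : Prop := xx ≠ []
instance (xx : List Int) : Decidable (Pre_my_f xx) := by unfold Pre_my_f; infer_instance
def pvWitness_my_f : List Int := [0, 2, 7, 1]

def Spec_my_f (xx : List Int) (out : List Int) : Prop := out = my_f_alt xx
instance (xx : List Int) (out : List Int) : Decidable (Spec_my_f xx out) := by unfold Spec_my_f; infer_instance

-- ===== CLAIM (what is proved, stated in full; the proofs are below) =====
def Claim_equal_my_f : Prop := ∀ (xx : List Int), Dom_my_f xx → Pre_my_f xx → Spec_my_f xx (my_f xx)

-- ===== LEMMAS AND PROOFS =====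

theorem my_f_loop_length (index length : Int) (t : Nat) : ∀ (x : List Int),
    (my_f_loop x index length t).length = x.length := by
  induction t generalizing index with
  | zero => intro x; rfl
  | succ t ih => intro x; rw [my_f_loop, ih]; simp

-- the number of extra units position j has received after t steps of the loop, closed form
def hitsInd (n iN j : Nat) (t : Nat) : Int :=
  ((t / n : Nat) : Int) +
    (if 1 ≤ ((j : Int) - iN) % (n : Int) ∧ ((j : Int) - iN) % (n : Int) ≤ ((t % n : Nat) : Int)
     then 1 else 0)

theorem step_index (n iN : Nat) :
    PySem.Int.mod ((iN : Int) + 1) (n : Int) = (((iN + 1) % n : Nat) : Int) := by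
  have h : ((iN : Int) + 1) = ((iN + 1 : Nat) : Int) := by push_cast; ring
  rw [h, PySem.Int.mod_natCast]

theorem nat_succ_div_mod (n t : Nat) (hn : 0 < n) :
    (t + 1) / n = t / n + (if t % n + 1 = n then 1 else 0) ∧
    (t + 1) % n = (if t % n + 1 = n then 0 else t % n + 1) := by
  have h := Nat.div_add_mod t n
  have hR : t % n < n := Nat.mod_lt _ hn
  have e : t + 1 = (t % n + 1) + n * (t / n) := by
    conv_lhs => rw [← h]
    ring
  rw [e, Nat.add_mul_div_left _ _ hn, Nat.add_mul_mod_self_left]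
  by_cases hc : t % n + 1 = n
  · rw [hc, Nat.div_self hn, Nat.mod_self]
    refine ⟨by rw [if_pos rfl]; omega, by rw [if_pos rfl]⟩
  · have hlt : t % n + 1 < n := by omega
    rw [Nat.div_eq_of_lt hlt, Nat.mod_eq_of_lt hlt]
    simp [hc]

theorem hits_succ (n iN j t : Nat) (hn : 0 < n) (hi : iN < n) (hj : j < n) :
    hitsInd n iN j (t + 1) =
      (if (iN + 1) % n = j then 1 else 0) + hitsInd n ((iN + 1) % n) j t := by
  have hnz : (n : Int) ≠ 0 := by exact_mod_cast hn.ne'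
  have hnI : (0 : Int) < n := by exact_mod_cast hn
  have hiN' : (iN + 1) % n < n := Nat.mod_lt _ hn
  obtain ⟨hd, hm⟩ := nat_succ_div_mod n t hn
  unfold hitsInd
  rw [hd, hm]
  set c : Int := (j : Int) - iN with hc
  set a : Int := c % (n : Int) with ha
  set a' : Int := ((j : Int) - (((iN + 1) % n : Nat) : Int)) % (n : Int) with ha'def
  set R := t % n with hR'
  set Q := t / n with hQ'
  have ha0 : 0 ≤ a := Int.emod_nonneg c hnz
  have ha1 : a < n := Int.emod_lt_of_pos c hnI
  have ha'0 : 0 ≤ a' := Int.emod_nonneg _ hnz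
  have ha'1 : a' < n := Int.emod_lt_of_pos _ hnI
  have hca : (c - a) % (n : Int) = 0 := by
    apply Int.emod_eq_emod_iff_emod_sub_eq_zero.mp
    rw [Int.emod_eq_of_lt ha0 ha1]
  have hdm : (n : Int) * (((iN + 1) / n : Nat) : Int) + (((iN + 1) % n : Nat) : Int)
      = (iN : Int) + 1 := by exact_mod_cast Nat.div_add_mod (iN + 1) n
  have ha' : a' = (a - 1) % (n : Int) := by
    rw [ha'def]
    apply Int.emod_eq_emod_iff_emod_sub_eq_zero.mpr
    have h2 : ((j : Int) - (((iN + 1) % n : Nat) : Int)) - (a - 1)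
        = (c - a) + (n : Int) * (((iN + 1) / n : Nat) : Int) := by
      rw [hc]; linarith [hdm]
    rw [h2, Int.add_mul_emod_self_left, hca]
  have hRlt : R < n := Nat.mod_lt _ hn
  by_cases h1 : n = 1
  · subst h1
    have hj0 : j = 0 := by omega
    have hi0 : iN = 0 := by omega
    subst hj0; subst hi0
    have hQ : Q = t := by omega
    have hRz : R = 0 := by omega
    have hazz : a = 0 := by omega
    have ha'z : a' = 0 := by omega
    rw [hQ, hRz, hazz, ha'z]
    norm_num
    omega
  · have hn2 : 2 ≤ n := by omega
    by_cases ha0eq : a = 0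
    · -- position j is hit only on a full wrap
      have hval : a' = (n : Int) - 1 := by
        rw [ha', ha0eq]
        rw [show (0 : Int) - 1 = ((n : Int) - 1) + (n : Int) * (-1) by ring,
            Int.add_mul_emod_self_left, Int.emod_eq_of_lt (by omega) (by omega)]
      have hne : ¬ ((iN + 1) % n = j) := by
        intro he
        have hcast : ((((iN + 1) % n : Nat)) : Int) = (j : Int) := by exact_mod_cast he
        rw [ha'def, hcast, sub_self, Int.zero_emod] at hval
        omega
      rw [if_neg hne]
      split_ifs <;> push_cast at * <;> omega
    · have hage1 : 1 ≤ a := by omega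
      by_cases he : (iN + 1) % n = j
      · have hcast : ((((iN + 1) % n : Nat)) : Int) = (j : Int) := by exact_mod_cast he
        have haz : a' = 0 := by rw [ha'def, hcast, sub_self, Int.zero_emod]
        have haone : a = 1 := by
          have h4 : (a - 1) % (n : Int) = 0 := by rw [← ha']; exact haz
          rw [Int.emod_eq_of_lt (by omega) (by omega)] at h4
          omega
        rw [if_pos he]
        split_ifs <;> push_cast at * <;> omega
      · have haz : a' ≠ 0 := by
          intro h0
          have hdvd : (n : Int) ∣ ((j : Int) - (((iN + 1) % n : Nat) : Int)) :=
            Int.dvd_of_emod_eq_zero (by rw [← ha'def]; exact h0)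
          have h5 := Int.eq_zero_of_dvd_of_natAbs_lt_natAbs hdvd (by
            simp only [Int.natAbs_natCast]
            omega)
          apply he
          omega
        have ha'' : a' = a - 1 := by
          rw [ha', Int.emod_eq_of_lt (by omega) (by omega)]
        rw [if_neg he, ha'']
        split_ifs <;> push_cast at * <;> omega

theorem loop_getD (n : Nat) (hn : 0 < n) : ∀ (t : Nat) (x : List Int) (iN j : Nat),
    x.length = n → iN < n → j < n →
    (my_f_loop x (iN : Int) (n : Int) t).getD j 0 = x.getD j 0 + hitsInd n iN j t := by
  intro t
  induction t with
  | zero =>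
    intro x iN j hx hi hj
    rw [my_f_loop, hitsInd]
    simp only [Nat.zero_div, Nat.zero_mod, Nat.cast_zero]
    split_ifs with h
    · exact absurd (h.1.trans h.2) (by norm_num)
    · ring
  | succ t ih =>
    intro x iN j hx hi hj
    simp only [my_f_loop, step_index, Int.toNat_natCast]
    have hiN' : (iN + 1) % n < n := Nat.mod_lt _ hn
    rw [ih _ ((iN + 1) % n) j (by simpa using hx) hiN' hj]
    have hset : (x.set ((iN + 1) % n) (x.getD ((iN + 1) % n) 0 + 1)).getD j 0
        = x.getD j 0 + (if (iN + 1) % n = j then 1 else 0) := by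
      rw [List.getD_eq_getElem?_getD, List.getElem?_set]
      by_cases h : (iN + 1) % n = j
      · rw [if_pos h, if_pos (by omega : (iN + 1) % n < x.length), if_pos h]
        rw [Option.getD_some, h, List.getD_eq_getElem?_getD]
      · rw [if_neg h, if_neg h, add_zero, List.getD_eq_getElem?_getD]
    rw [hset, hits_succ n iN j t hn hi hj]
    ring

-- ===== VERDICT (by name: the statement is the Claim_ definition above) =====
theorem my_f_spec : Claim_equal_my_f := by
  intro xx _ hpre
  unfold Spec_my_f my_f my_f_alt
  rcases hmax : PySem.List.max? xx (fun y => y) with _ | mx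
  · rfl
  rcases hidx : PySem.List.index? xx mx with _ | i
  · simp only [hidx]
  simp only [hidx]
  obtain ⟨hik, hxi, -⟩ := PySem.List.getElem_of_index?_eq_some hidx
  set x0 := xx.set i 0 with hx0
  have hlen : x0.length = xx.length := by simp [hx0]
  have hn : 0 < x0.length := by omega
  by_cases hmx : mx ≤ 0
  · rw [if_pos hmx]
    have h0 : mx.toNat = 0 := Int.toNat_of_nonpos hmx
    rw [h0, my_f_loop]
  · rw [if_neg hmx]
    replace hmx : 0 < mx := lt_of_not_ge hmx
    set n := x0.length with hnd
    set t := mx.toNat with ht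
    have hmxc : ((t : Nat) : Int) = mx := Int.toNat_of_nonneg hmx.le
    have hnI : (0 : Int) < (n : Int) := by exact_mod_cast hn
    apply List.ext_getElem
    · rw [my_f_loop_length]
      simp [PySem.List.length_enumerate, hnd]
    · intro j h1 h2
      have hjn : j < n := by rwa [my_f_loop_length] at h1
      have hA : (my_f_loop x0 (i : Int) (n : Int) t)[j]'h1 = x0.getD j 0 + hitsInd n i j t := by
        rw [← List.getD_eq_getElem _ 0 h1]
        exact loop_getD n hn t x0 i j rfl (by omega) hjn
      rw [hA, List.getElem_map]
      have hlenE : j < (PySem.List.enumerate x0 0).length := by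
        simpa [PySem.List.length_enumerate] using hjn
      have hjx : j < x0.length := hjn
      have henum : (PySem.List.enumerate x0 0)[j]'hlenE = ((j : Int), x0[j]'hjx) := by
        have h6 := PySem.List.getElem?_enumerate x0 0 j
        rw [List.getElem?_eq_getElem hlenE, List.getElem?_eq_getElem hjx] at h6
        simpa using h6
      rw [henum]
      rw [← hmxc, PySem.Int.floordiv_natCast, PySem.Int.mod_natCast,
        PySem.Int.mod_eq_emod_of_pos hnI]
      rw [List.getD_eq_getElem _ 0 hjx]
      unfold hitsInd
      ring
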